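-- pv_equiv track=rewrite | github.com/jgfranco/formation | 2024_01/uglyNumber.py | isUgly
-- ===== SOURCE A (Python) =====
-- def isUgly(n: int) -> bool:
--   if n <= 0:
--     return False
--   if n == 1:
--     return True
--
--   primeFactors = [2,3,5]
--   if n in primeFactors:
--     return True
--
--   for prime in primeFactors:
--     if n%prime == 0:
--       return isUgly(n//prime)
--
--   return False
-- ===== SOURCE B (Python) =====
-- def isUgly(n: int) -> bool:
--     if n <= 0:
--         return False
--     for p in (2, 3, 5):
--         while n % p == 0:
--             n //= p
--     return n == 1
-- ===== Notes on version B (the rewrite author's own statement) =====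
-- stated objective: idiomatic
-- what changed: Replaced the recursive one-factor-at-a-time definition (with its list-membership early return) by an iterative version that fully strips each of the three prime factors with an inner while-loop and finally tests whether the remainder equals one.
import Mathlib
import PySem

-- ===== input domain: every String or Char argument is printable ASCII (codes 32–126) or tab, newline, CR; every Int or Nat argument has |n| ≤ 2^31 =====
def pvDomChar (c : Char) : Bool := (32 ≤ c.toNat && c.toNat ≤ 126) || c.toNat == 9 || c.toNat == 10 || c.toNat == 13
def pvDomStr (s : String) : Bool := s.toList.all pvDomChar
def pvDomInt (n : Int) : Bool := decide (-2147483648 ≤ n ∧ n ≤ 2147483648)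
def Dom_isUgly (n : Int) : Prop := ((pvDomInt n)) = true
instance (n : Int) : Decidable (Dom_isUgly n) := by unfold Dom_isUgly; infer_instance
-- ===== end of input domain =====

-- B replaces A's recursion (one factor removed per call, plus a list-membership early return)
-- by iterative inner while-loops stripping each prime fully, then a final n == 1 test (idiomatic).

-- termination helper for both ports (cited by name in decreasing_by)
theorem pvFloordivToNatLt (n p : Int) (h0 : 0 < n) (hp : 2 ≤ p) :
    (PySem.Int.floordiv n p).toNat < n.toNat := by
  have h : PySem.Int.floordiv n p < n := by
    rw [PySem.Int.floordiv_lt_iff_lt_mul (by omega)]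
    nlinarith
  omega

-- ===== PORT A =====
def isUgly (n : Int) : Bool :=
  if n ≤ 0 then false
  else if n = 1 then true
  else if n ∈ ([2, 3, 5] : List Int) then true
  else if h2 : PySem.Int.mod n 2 = 0 then isUgly (PySem.Int.floordiv n 2)
  else if h3 : PySem.Int.mod n 3 = 0 then isUgly (PySem.Int.floordiv n 3)
  else if h5 : PySem.Int.mod n 5 = 0 then isUgly (PySem.Int.floordiv n 5)
  else false
termination_by n.toNat
decreasing_by
  · exact pvFloordivToNatLt n 2 (by omega) (by omega)
  · exact pvFloordivToNatLt n 3 (by omega) (by omega)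
  · exact pvFloordivToNatLt n 5 (by omega) (by omega)

-- ===== PORT B =====
-- `while n % p == 0: n //= p`; the 0 < n ∧ 2 ≤ p guard only makes the loop total
-- (it always holds at every call site of B's code).
def stripFactor (p n : Int) : Int :=
  if h : 0 < n ∧ 2 ≤ p ∧ PySem.Int.mod n p = 0 then stripFactor p (PySem.Int.floordiv n p)
  else n
termination_by n.toNat
decreasing_by exact pvFloordivToNatLt n p h.1 h.2.1

def isUgly_alt (n : Int) : Bool :=
  if n ≤ 0 then false
  else decide (stripFactor 5 (stripFactor 3 (stripFactor 2 n)) = 1)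

-- ===== PRECONDITION & SPEC =====
def Spec_isUgly (n : Int) (out : Bool) : Prop := out = isUgly_alt n
instance (n : Int) (out : Bool) : Decidable (Spec_isUgly n out) := by unfold Spec_isUgly; infer_instance

-- ===== CLAIM (what is proved, stated in full; the proofs are below) =====
def Claim_equal_isUgly : Prop := ∀ (n : Int), Dom_isUgly n → Spec_isUgly n (isUgly n)

-- ===== LEMMAS AND PROOFS =====

theorem strip_step (p n : Int) (h0 : 0 < n) (hp : 2 ≤ p) (h : PySem.Int.mod n p = 0) :
    stripFactor p n = stripFactor p (PySem.Int.floordiv n p) := by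
  rw [stripFactor]; simp [h0, hp, h]

theorem strip_eq_self (p n : Int) (h : PySem.Int.mod n p ≠ 0) : stripFactor p n = n := by
  rw [stripFactor]; simp [h]

theorem fd_mul (p n : Int) (h : PySem.Int.mod n p = 0) : PySem.Int.floordiv n p * p = n := by
  have hq := PySem.Int.floordiv_mul_add_mod n p
  rw [h, add_zero] at hq
  exact hq

theorem fd_pos (p n : Int) (hp : 2 ≤ p) (hn : 0 < n) (h : PySem.Int.mod n p = 0) :
    0 < PySem.Int.floordiv n p := by
  have hq := fd_mul p n h
  nlinarith [PySem.Int.floordiv n p]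

theorem strip_eq_self_ndvd (p n : Int) (h : ¬ p ∣ n) : stripFactor p n = n := by
  exact strip_eq_self p n (fun hc => h ((PySem.Int.mod_eq_zero_iff_dvd n p).mp hc))

theorem main_eq (n : Int) : isUgly n = isUgly_alt n := by
  fun_induction isUgly n with
  | case1 n h0 => simp [isUgly_alt, h0]
  | case2 h0 =>
    simp only [isUgly_alt, if_neg h0]
    rw [strip_eq_self 2 1 (by decide), strip_eq_self 3 1 (by decide), strip_eq_self 5 1 (by decide)]
    decide
  | case3 n h0 h1 hm =>
    simp only [List.mem_cons, List.not_mem_nil, or_false] at hm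
    simp only [isUgly_alt, if_neg h0]
    rcases hm with h | h | h <;> subst h
    · rw [strip_step 2 2 (by decide) (by decide) (by decide)]
      norm_num [show PySem.Int.floordiv 2 2 = 1 from by decide]
      rw [strip_eq_self 2 1 (by decide), strip_eq_self 3 1 (by decide),
        strip_eq_self 5 1 (by decide)]
    · rw [strip_eq_self 2 3 (by decide), strip_step 3 3 (by decide) (by decide) (by decide)]
      norm_num [show PySem.Int.floordiv 3 3 = 1 from by decide]
      rw [strip_eq_self 3 1 (by decide), strip_eq_self 5 1 (by decide)]
    · rw [strip_eq_self 2 5 (by decide), strip_eq_self 3 5 (by decide),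
        strip_step 5 5 (by decide) (by decide) (by decide)]
      norm_num [show PySem.Int.floordiv 5 5 = 1 from by decide]
      rw [strip_eq_self 5 1 (by decide)]
  | case4 n h0 h1 hm h2 ih =>
    rw [ih]
    have hp : 0 < PySem.Int.floordiv n 2 := fd_pos 2 n (by omega) (by omega) h2
    simp only [isUgly_alt, if_neg h0, if_neg (by omega : ¬ PySem.Int.floordiv n 2 ≤ 0)]
    rw [strip_step 2 n (by omega) (by omega) h2]
  | case5 n h0 h1 hm h2 h3 ih =>
    rw [ih]
    have hp : 0 < PySem.Int.floordiv n 3 := fd_pos 3 n (by omega) (by omega) h3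
    have h2d : ¬ (2:Int) ∣ n := by rw [← PySem.Int.mod_eq_zero_iff_dvd]; exact h2
    have h2d' : ¬ (2:Int) ∣ PySem.Int.floordiv n 3 := fun hd => h2d (fd_mul 3 n h3 ▸ hd.mul_right 3)
    simp only [isUgly_alt, if_neg h0, if_neg (by omega : ¬ PySem.Int.floordiv n 3 ≤ 0)]
    rw [strip_eq_self_ndvd 2 n h2d, strip_eq_self_ndvd 2 _ h2d',
      strip_step 3 n (by omega) (by omega) h3]
  | case6 n h0 h1 hm h2 h3 h5 ih =>
    rw [ih]
    have hp : 0 < PySem.Int.floordiv n 5 := fd_pos 5 n (by omega) (by omega) h5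
    have h2d : ¬ (2:Int) ∣ n := by rw [← PySem.Int.mod_eq_zero_iff_dvd]; exact h2
    have h3d : ¬ (3:Int) ∣ n := by rw [← PySem.Int.mod_eq_zero_iff_dvd]; exact h3
    have h2d' : ¬ (2:Int) ∣ PySem.Int.floordiv n 5 := fun hd => h2d (fd_mul 5 n h5 ▸ hd.mul_right 5)
    have h3d' : ¬ (3:Int) ∣ PySem.Int.floordiv n 5 := fun hd => h3d (fd_mul 5 n h5 ▸ hd.mul_right 5)
    simp only [isUgly_alt, if_neg h0, if_neg (by omega : ¬ PySem.Int.floordiv n 5 ≤ 0)]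
    rw [strip_eq_self_ndvd 2 n h2d, strip_eq_self_ndvd 2 _ h2d',
      strip_eq_self_ndvd 3 n h3d, strip_eq_self_ndvd 3 _ h3d',
      strip_step 5 n (by omega) (by omega) h5]
  | case7 n h0 h1 hm h2 h3 h5 =>
    simp only [isUgly_alt, if_neg h0]
    rw [strip_eq_self 2 n h2, strip_eq_self 3 n h3, strip_eq_self 5 n h5]
    simp [h1]

-- ===== VERDICT (by name: the statement is the Claim_ definition above) =====
theorem isUgly_spec : Claim_equal_isUgly := by
  intro n _
  exact main_eq n
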